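-- pv_equiv track=rewrite | github.com/XkaunanX/Python | paradigmas/logico.py | consulta
-- ===== SOURCE A (Python) =====
-- familia = {
--     'juan': {'padre': 'pedro', 'madre': 'ana'},
--     'maria': {'padre': 'pedro', 'madre': 'ana'},
--     'pedro': {'padre': 'carlos', 'madre': 'marta'},
--     'ana': {'padre': 'jose', 'madre': 'elena'},
--     'carlos': {'padre': 'jose', 'madre': 'elena'},
--     'marta': {'padre': 'juan', 'madre': 'lina'}
-- }
--
-- def es_padre(de, hijo):
--     return familia.get(hijo, {}).get('padre') == de
--
-- def es_madre(de, hijo):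
--     return familia.get(hijo, {}).get('madre') == de
--
-- def es_hermano(o1, o2):
--     """Verifica si dos personas son hermanos."""
--     return (familia.get(o1, {}).get('padre') == familia.get(o2, {}).get('padre') and
--             familia.get(o1, {}).get('madre') == familia.get(o2, {}).get('madre') and
--             o1 != o2)
--
-- def consulta(relacion, *personas):
--     if relacion == 'es_padre':
--         for persona in familia:
--             for hijo in familia:
--                 if es_padre(persona, hijo):
--                     if persona in personas and hijo in personas:
--                         return True
--     elif relacion == 'es_madre':
--         for persona in familia:
--             for hijo in familia:
--                 if es_madre(persona, hijo):
--                     if persona in personas and hijo in personas: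
--                         return True
--     elif relacion == 'es_hermano':
--         for o1 in familia:
--             for o2 in familia:
--                 if es_hermano(o1, o2):
--                     if o1 in personas and o2 in personas:
--                         return True
--     return False
-- ===== SOURCE B (Python) =====
-- familia = {
--     'juan': {'padre': 'pedro', 'madre': 'ana'},
--     'maria': {'padre': 'pedro', 'madre': 'ana'},
--     'pedro': {'padre': 'carlos', 'madre': 'marta'},
--     'ana': {'padre': 'jose', 'madre': 'elena'},
--     'carlos': {'padre': 'jose', 'madre': 'elena'},
--     'marta': {'padre': 'juan', 'madre': 'lina'}
-- }
--
--
-- def _build_facts():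
--     # Precompute, once, every (relation, x, y) fact that holds among family KEYS
--     # (a parent only counts if it is itself a key of `familia`, as in the scan of A).
--     kids = [(h, padres['padre'], padres['madre']) for h, padres in familia.items()]
--     facts = set()
--     for h, p, m in kids:
--         if p in familia:
--             facts.add(('es_padre', p, h))
--         if m in familia:
--             facts.add(('es_madre', m, h))
--     for a, pa, ma in kids:
--         for b, pb, mb in kids:
--             if a != b and pa == pb and ma == mb:
--                 facts.add(('es_hermano', a, b))
--     return facts
--
--
-- _FACTS = _build_facts()
--
--
-- def consulta(relacion, *personas):
--     ps = set(personas)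
--     return any(r == relacion and x in ps and y in ps for r, x, y in _FACTS)
-- ===== Notes on version B (the rewrite author's own statement) =====
-- stated objective: alternative
-- what changed: B precomputes once a set of all (relation, x, y) facts that hold among family keys and answers a query by a single scan of that fact set against set(personas), instead of A's per-query dispatch on the relation name with a nested double scan of the whole family calling es_padre/es_madre/es_hermano.
import Mathlib
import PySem

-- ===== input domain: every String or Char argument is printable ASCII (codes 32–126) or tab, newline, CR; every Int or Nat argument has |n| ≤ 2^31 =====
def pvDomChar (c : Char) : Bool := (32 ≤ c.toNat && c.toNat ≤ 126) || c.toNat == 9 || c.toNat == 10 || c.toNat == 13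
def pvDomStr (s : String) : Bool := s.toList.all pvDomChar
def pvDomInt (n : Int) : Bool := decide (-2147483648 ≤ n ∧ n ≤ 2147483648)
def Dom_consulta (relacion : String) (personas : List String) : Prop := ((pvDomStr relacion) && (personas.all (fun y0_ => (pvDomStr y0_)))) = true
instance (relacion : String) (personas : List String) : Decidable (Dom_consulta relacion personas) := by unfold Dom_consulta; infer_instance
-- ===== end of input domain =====

-- B replaces A's per-query dispatch with nested double scans of the family by a precomputed
-- set of (relation, x, y) facts among family keys, checked against set(personas) in one scan (alternative decomposition).


-- ===== PORT A =====
def familiaPy : PySem.Dict String (PySem.Dict String String) :=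
  PySem.Dict.ofList
    [ ("juan",   PySem.Dict.ofList [("padre", "pedro"),  ("madre", "ana")]),
      ("maria",  PySem.Dict.ofList [("padre", "pedro"),  ("madre", "ana")]),
      ("pedro",  PySem.Dict.ofList [("padre", "carlos"), ("madre", "marta")]),
      ("ana",    PySem.Dict.ofList [("padre", "jose"),   ("madre", "elena")]),
      ("carlos", PySem.Dict.ofList [("padre", "jose"),   ("madre", "elena")]),
      ("marta",  PySem.Dict.ofList [("padre", "juan"),   ("madre", "lina")]) ]

-- familia.get(x, {}).get(k)  (Option String: none = Python's None)
def famGet (x : String) (k : String) : Option String :=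
  PySem.Dict.get? (PySem.Dict.getD familiaPy x PySem.Dict.empty) k

def esPadre (de hijo : String) : Bool := famGet hijo "padre" == some de

def esMadre (de hijo : String) : Bool := famGet hijo "madre" == some de

def esHermano (o1 o2 : String) : Bool :=
  famGet o1 "padre" == famGet o2 "padre" && famGet o1 "madre" == famGet o2 "madre" && o1 != o2

def consulta (relacion : String) (personas : List String) : Bool :=
  if relacion == "es_padre" then
    (PySem.Dict.keys familiaPy).any fun persona =>
      (PySem.Dict.keys familiaPy).any fun hijo =>
        esPadre persona hijo && personas.contains persona && personas.contains hijo
  else if relacion == "es_madre" then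
    (PySem.Dict.keys familiaPy).any fun persona =>
      (PySem.Dict.keys familiaPy).any fun hijo =>
        esMadre persona hijo && personas.contains persona && personas.contains hijo
  else if relacion == "es_hermano" then
    (PySem.Dict.keys familiaPy).any fun o1 =>
      (PySem.Dict.keys familiaPy).any fun o2 =>
        esHermano o1 o2 && personas.contains o1 && personas.contains o2
  else false

-- ===== PORT B =====
-- kids = [(h, padres['padre'], padres['madre']) …]; the keys 'padre'/'madre' are present in every
-- (concrete) family entry, so the getD default "" is never consulted (exact on this data).
def kidsB : List (String × String × String) :=
  (PySem.Dict.items familiaPy).map fun hp =>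
    (hp.1, PySem.Dict.getD hp.2 "padre" "", PySem.Dict.getD hp.2 "madre" "")

def factsB : PySem.Set (String × String × String) :=
  let f1 := kidsB.foldl (fun f t =>
    let f := if PySem.Dict.contains familiaPy t.2.1 then PySem.Set.add f ("es_padre", t.2.1, t.1) else f
    if PySem.Dict.contains familiaPy t.2.2 then PySem.Set.add f ("es_madre", t.2.2, t.1) else f)
    PySem.Set.empty
  kidsB.foldl (fun f a => kidsB.foldl (fun f b =>
    if a.1 != b.1 && a.2.1 == b.2.1 && a.2.2 == b.2.2
    then PySem.Set.add f ("es_hermano", a.1, b.1) else f) f) f1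

def consulta_alt (relacion : String) (personas : List String) : Bool :=
  let ps : PySem.Set String := PySem.Set.ofList personas
  factsB.any fun t => t.1 == relacion && PySem.Set.contains ps t.2.1 && PySem.Set.contains ps t.2.2

-- ===== PRECONDITION & SPEC =====
def Spec_consulta (relacion : String) (personas : List String) (out : Bool) : Prop := out = consulta_alt relacion personas
instance (relacion : String) (personas : List String) (out : Bool) : Decidable (Spec_consulta relacion personas out) := by unfold Spec_consulta; infer_instance

-- ===== CLAIM (what is proved, stated in full; the proofs are below) =====
def Claim_equal_consulta : Prop := ∀ (relacion : String) (personas : List String), Dom_consulta relacion personas → Spec_consulta relacion personas (consulta relacion personas)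

-- ===== LEMMAS AND PROOFS =====
theorem contains_ofList_eq (xs : List String) (x : String) :
    PySem.Set.contains (PySem.Set.ofList xs) x = xs.contains x := by
  cases h : xs.contains x
  · simp only [List.contains_eq_mem, decide_eq_false_iff_not] at h
    simp [PySem.Set.contains_eq_listContains, PySem.Set.mem_ofList, h]
  · simp only [List.contains_eq_mem, decide_eq_true_eq] at h
    simp [PySem.Set.contains_eq_listContains, PySem.Set.mem_ofList, h]

-- the closed fact set B precomputes, evaluated
theorem hfacts : factsB = [("es_padre","pedro","juan"),("es_madre","ana","juan"),("es_padre","pedro","maria"),("es_madre","ana","maria"),("es_padre","carlos","pedro"),("es_madre","marta","pedro"),("es_padre","juan","marta"),("es_hermano","juan","maria"),("es_hermano","maria","juan"),("es_hermano","ana","carlos"),("es_hermano","carlos","ana")] := by rfl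

theorem evalA_padre (ps : List String) : consulta "es_padre" ps =
    (((ps.contains "juan" && ps.contains "marta") || false) ||
    (((ps.contains "pedro" && ps.contains "juan") || ((ps.contains "pedro" && ps.contains "maria") || false)) ||
     (((ps.contains "carlos" && ps.contains "pedro") || false) || false))) := by rfl

theorem evalA_madre (ps : List String) : consulta "es_madre" ps =
    ((((ps.contains "ana" && ps.contains "juan") || ((ps.contains "ana" && ps.contains "maria") || false))) ||
     (((ps.contains "marta" && ps.contains "pedro") || false) || false)) := by rfl

theorem evalA_hermano (ps : List String) : consulta "es_hermano" ps =
    (((ps.contains "juan" && ps.contains "maria") || false) ||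
     (((ps.contains "maria" && ps.contains "juan") || false) ||
      (((ps.contains "ana" && ps.contains "carlos") || false) ||
       (((ps.contains "carlos" && ps.contains "ana") || false) || false)))) := by rfl

theorem evalB_padre (ps : List String) : consulta_alt "es_padre" ps =
    ((PySem.Set.contains (PySem.Set.ofList ps) "pedro" && PySem.Set.contains (PySem.Set.ofList ps) "juan") ||
     ((PySem.Set.contains (PySem.Set.ofList ps) "pedro" && PySem.Set.contains (PySem.Set.ofList ps) "maria") ||
      ((PySem.Set.contains (PySem.Set.ofList ps) "carlos" && PySem.Set.contains (PySem.Set.ofList ps) "pedro") ||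
       ((PySem.Set.contains (PySem.Set.ofList ps) "juan" && PySem.Set.contains (PySem.Set.ofList ps) "marta") || false)))) := by rfl

theorem evalB_madre (ps : List String) : consulta_alt "es_madre" ps =
    ((PySem.Set.contains (PySem.Set.ofList ps) "ana" && PySem.Set.contains (PySem.Set.ofList ps) "juan") ||
     ((PySem.Set.contains (PySem.Set.ofList ps) "ana" && PySem.Set.contains (PySem.Set.ofList ps) "maria") ||
      ((PySem.Set.contains (PySem.Set.ofList ps) "marta" && PySem.Set.contains (PySem.Set.ofList ps) "pedro") || false))) := by rfl

theorem evalB_hermano (ps : List String) : consulta_alt "es_hermano" ps =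
    ((PySem.Set.contains (PySem.Set.ofList ps) "juan" && PySem.Set.contains (PySem.Set.ofList ps) "maria") ||
     ((PySem.Set.contains (PySem.Set.ofList ps) "maria" && PySem.Set.contains (PySem.Set.ofList ps) "juan") ||
      ((PySem.Set.contains (PySem.Set.ofList ps) "ana" && PySem.Set.contains (PySem.Set.ofList ps) "carlos") ||
       ((PySem.Set.contains (PySem.Set.ofList ps) "carlos" && PySem.Set.contains (PySem.Set.ofList ps) "ana") || false)))) := by rfl

theorem consulta_eq_alt (relacion : String) (personas : List String) :
    consulta relacion personas = consulta_alt relacion personas := by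
  by_cases h1 : relacion = "es_padre"
  · subst h1
    rw [evalA_padre, evalB_padre]
    simp only [contains_ofList_eq]
    generalize personas.contains "juan" = a
    generalize personas.contains "maria" = b
    generalize personas.contains "pedro" = c
    generalize personas.contains "carlos" = d
    generalize personas.contains "marta" = e
    revert a b c d e; decide
  · by_cases h2 : relacion = "es_madre"
    · subst h2
      rw [evalA_madre, evalB_madre]
      simp only [contains_ofList_eq]
      generalize personas.contains "juan" = a
      generalize personas.contains "maria" = b
      generalize personas.contains "pedro" = c
      generalize personas.contains "ana" = d
      generalize personas.contains "marta" = e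
      revert a b c d e; decide
    · by_cases h3 : relacion = "es_hermano"
      · subst h3
        rw [evalA_hermano, evalB_hermano]
        simp only [contains_ofList_eq]
        generalize personas.contains "juan" = a
        generalize personas.contains "maria" = b
        generalize personas.contains "ana" = c
        generalize personas.contains "carlos" = d
        revert a b c d; decide
      · have g1 : ("es_padre" : String) ≠ relacion := fun e => h1 e.symm
        have g2 : ("es_madre" : String) ≠ relacion := fun e => h2 e.symm
        have g3 : ("es_hermano" : String) ≠ relacion := fun e => h3 e.symm
        simp only [consulta, consulta_alt]
        rw [hfacts]
        simp [h1, h2, h3, g1, g2, g3]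

-- ===== VERDICT (by name: the statement is the Claim_ definition above) =====
theorem consulta_spec : Claim_equal_consulta := by
  intro r ps _
  exact consulta_eq_alt r ps
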